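-- pv_equiv track=rewrite | github.com/birc-gsa-2022/cigar-python-marse00 | src/align.py | get_edits
-- ===== SOURCE A (Python) =====
-- def get_edits(p: str, q: str) -> tuple[str, str, str]:
--     """Extract the edit operations from a pairwise alignment.
--
--     Args:
--         p (str): The first row in the pairwise alignment.
--         q (str): The second row in the pairwise alignment.
--
--     Returns:
--         str: The list of edit operations as a string.
--
--     >>> get_edits('ACCACAGT-CATA', 'A-CAGAGTACAAA')
--     ('ACCACAGTCATA', 'ACAGAGTACAAA', 'MDMMMMMMIMMMM')
--
--     """
--     assert len(p) == len(q)
--     # FIXME: do the actual calculations here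
--     orig, trans, cigar = "","",""
--
--     for i in range(len(p)):
--         if p[i] != "-" and q[i] != "-":
--             orig += f"{p[i]}"
--             trans += f"{q[i]}"
--             cigar += f"M"
--         elif p[i] == "-" and q[i] != "-":
--             trans += f"{q[i]}"
--             cigar += f"I"
--         elif p[i] != "-" and q[i] == "-":
--             orig += f"{p[i]}"
--             cigar += f"D"
--
--     return orig, trans, cigar
-- ===== SOURCE B (Python) =====
-- def get_edits(p: str, q: str) -> tuple[str, str, str]:
--     """Extract the edit operations from a pairwise alignment.
--
--     orig/trans are just the rows with the gaps removed; the cigar is a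
--     separate per-column classification (both-gap columns contribute nothing).
--     """
--     assert len(p) == len(q)
--     orig = ''.join(c for c in p if c != '-')
--     trans = ''.join(c for c in q if c != '-')
--     ops = []
--     for a, b in zip(p, q):
--         if a == '-':
--             if b != '-':
--                 ops.append('I')
--         elif b == '-':
--             ops.append('D')
--         else:
--             ops.append('M')
--     return orig, trans, ''.join(ops)
-- ===== Notes on version B (the rewrite author's own statement) =====
-- stated objective: simpler
-- what changed: Instead of one index loop threading three string accumulators, B obtains orig/trans directly as each row with gaps filtered out and classifies the cigar in a separate pass over zipped columns.
import Mathlib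
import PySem

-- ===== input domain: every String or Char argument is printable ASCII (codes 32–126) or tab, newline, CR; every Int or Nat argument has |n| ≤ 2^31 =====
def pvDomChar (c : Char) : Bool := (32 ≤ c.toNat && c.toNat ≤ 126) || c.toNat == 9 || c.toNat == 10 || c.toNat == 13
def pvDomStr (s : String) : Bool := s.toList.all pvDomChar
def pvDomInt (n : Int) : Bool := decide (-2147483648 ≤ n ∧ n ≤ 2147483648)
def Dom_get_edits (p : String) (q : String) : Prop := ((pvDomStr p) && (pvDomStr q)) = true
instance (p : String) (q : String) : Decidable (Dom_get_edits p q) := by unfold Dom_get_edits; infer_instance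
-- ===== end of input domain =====

-- B removes gaps by filtering each row and classifies the cigar in one zipped pass: simpler decomposition.
-- ===== PORT A =====
-- literal port of A's index loop; Pre_ guarantees the assert holds and every pyGetD is in range
def get_edits (p : String) (q : String) : String × String × String :=
  let pl := p.toList
  let ql := q.toList
  let res := (PySem.List.pyRange 0 pl.length 1).foldl
    (fun (st : List Char × List Char × List Char) i =>
      let pc := PySem.List.pyGetD pl i ' '
      let qc := PySem.List.pyGetD ql i ' '
      if pc ≠ '-' ∧ qc ≠ '-' then (st.1 ++ [pc], st.2.1 ++ [qc], st.2.2 ++ ['M'])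
      else if pc = '-' ∧ qc ≠ '-' then (st.1, st.2.1 ++ [qc], st.2.2 ++ ['I'])
      else if pc ≠ '-' ∧ qc = '-' then (st.1 ++ [pc], st.2.1, st.2.2 ++ ['D'])
      else st) ([], [], [])
  (String.ofList res.1, String.ofList res.2.1, String.ofList res.2.2)

-- ===== PORT B =====
def get_edits_alt (p : String) (q : String) : String × String × String :=
  let orig := p.toList.filter (fun c => c ≠ '-')
  let trans := q.toList.filter (fun c => c ≠ '-')
  let ops := (p.toList.zip q.toList).foldl
    (fun (acc : List Char) ab =>
      if ab.1 = '-' then (if ab.2 ≠ '-' then acc ++ ['I'] else acc)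
      else if ab.2 = '-' then acc ++ ['D']
      else acc ++ ['M']) []
  (String.ofList orig, String.ofList trans, String.ofList ops)

-- ===== PRECONDITION & SPEC =====
-- A asserts len(p) == len(q) and raises AssertionError otherwise; Pre_ excludes exactly that.
def Pre_get_edits (p : String) (q : String) : Prop := p.length = q.length
instance (p : String) (q : String) : Decidable (Pre_get_edits p q) := by unfold Pre_get_edits; infer_instance
def pvWitness_get_edits : String × String := ("AC-A", "A-CA")
def Spec_get_edits (p : String) (q : String) (out : String × String × String) : Prop := out = get_edits_alt p q
instance (p : String) (q : String) (out : String × String × String) : Decidable (Spec_get_edits p q out) := by unfold Spec_get_edits; infer_instance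

-- ===== CLAIM (what is proved, stated in full; the proofs are below) =====
def Claim_equal_get_edits : Prop := ∀ (p : String) (q : String), Dom_get_edits p q → Pre_get_edits p q → Spec_get_edits p q (get_edits p q)

-- ===== LEMMAS AND PROOFS =====

-- A's loop step / B's cigar step, named for the proofs
def pvStepA (st : List Char × List Char × List Char) (ab : Char × Char) :
    List Char × List Char × List Char :=
  if ab.1 ≠ '-' ∧ ab.2 ≠ '-' then (st.1 ++ [ab.1], st.2.1 ++ [ab.2], st.2.2 ++ ['M'])
  else if ab.1 = '-' ∧ ab.2 ≠ '-' then (st.1, st.2.1 ++ [ab.2], st.2.2 ++ ['I'])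
  else if ab.1 ≠ '-' ∧ ab.2 = '-' then (st.1 ++ [ab.1], st.2.1, st.2.2 ++ ['D'])
  else st

def pvStepB (acc : List Char) (ab : Char × Char) : List Char :=
  if ab.1 = '-' then (if ab.2 ≠ '-' then acc ++ ['I'] else acc)
  else if ab.2 = '-' then acc ++ ['D']
  else acc ++ ['M']

lemma pvStepB_append (zs : List (Char × Char)) (c : List Char) :
    zs.foldl pvStepB c = c ++ zs.foldl pvStepB [] := by
  induction zs generalizing c with
  | nil => simp
  | cons z zs ih =>
    rw [List.foldl_cons, List.foldl_cons, ih, ih (pvStepB [] z)]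
    unfold pvStepB
    by_cases h1 : z.1 = '-' <;> by_cases h2 : z.2 = '-' <;> simp [h1, h2]

lemma pvMain (zs : List (Char × Char)) (o t c : List Char) :
    zs.foldl pvStepA (o, t, c) =
      (o ++ (zs.map Prod.fst).filter (fun x => x ≠ '-'),
       t ++ (zs.map Prod.snd).filter (fun x => x ≠ '-'),
       c ++ zs.foldl pvStepB []) := by
  induction zs generalizing o t c with
  | nil => simp
  | cons z zs ih =>
    rw [List.foldl_cons, List.foldl_cons, pvStepB_append]
    by_cases h1 : z.1 = '-' <;> by_cases h2 : z.2 = '-' <;>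
      simp [pvStepA, pvStepB, h1, h2, ih]

-- A's index loop equals the fold of pvStepA over the zipped rows (lengths equal)
lemma pvA_eq_zip (pl ql : List Char) (h : pl.length = ql.length) :
    (PySem.List.pyRange 0 pl.length 1).foldl
      (fun (st : List Char × List Char × List Char) i =>
        let pc := PySem.List.pyGetD pl i ' '
        let qc := PySem.List.pyGetD ql i ' '
        if pc ≠ '-' ∧ qc ≠ '-' then (st.1 ++ [pc], st.2.1 ++ [qc], st.2.2 ++ ['M'])
        else if pc = '-' ∧ qc ≠ '-' then (st.1, st.2.1 ++ [qc], st.2.2 ++ ['I'])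
        else if pc ≠ '-' ∧ qc = '-' then (st.1 ++ [pc], st.2.1, st.2.2 ++ ['D'])
        else st) ([], [], []) = (pl.zip ql).foldl pvStepA ([], [], []) := by
  have hz : (pl.zip ql).length = pl.length := by simp [h]
  rw [show pl.length = (pl.zip ql).length from hz.symm]
  refine Eq.trans
    (PySem.List.foldl_congr_mem _ _
      (fun (st : List Char × List Char × List Char) i =>
        pvStepA st (PySem.List.pyGetD (pl.zip ql) i ('-', '-'))) _ ?_)
    (PySem.List.foldl_pyRange_zero_pyGetD' (pl.zip ql) ('-', '-') pvStepA ([], [], []))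
  intro acc i hi
  have hmem := (PySem.List.mem_pyRange_one).1 hi
  have hlt : i.toNat < (pl.zip ql).length := by omega
  have h0 : (0:Int) ≤ i := hmem.1
  have hp : i.toNat < pl.length := by omega
  have hq : i.toNat < ql.length := by omega
  have e1 : PySem.List.pyGetD pl i ' ' = pl[i.toNat] :=
    PySem.List.pyGetD_eq_getElem pl ' ' h0 (by exact_mod_cast (by omega : i < (pl.length : Int)))
  have e2 : PySem.List.pyGetD ql i ' ' = ql[i.toNat] :=
    PySem.List.pyGetD_eq_getElem ql ' ' h0 (by exact_mod_cast (by omega : i < (ql.length : Int)))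
  have e3 : PySem.List.pyGetD (pl.zip ql) i ('-', '-') = (pl.zip ql)[i.toNat] :=
    PySem.List.pyGetD_eq_getElem _ _ h0 (by exact_mod_cast (by omega : i < ((pl.zip ql).length : Int)))
  simp only [e1, e2, e3, List.getElem_zip, pvStepA]

-- ===== VERDICT (by name: the statement is the Claim_ definition above) =====
set_option maxRecDepth 4000 in
theorem get_edits_spec : Claim_equal_get_edits := by
  intro p q _ hpre
  unfold Spec_get_edits
  have h : p.toList.length = q.toList.length := by
    unfold Pre_get_edits at hpre
    simpa [String.length_toList] using hpre
  simp only [get_edits, get_edits_alt]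
  rw [pvA_eq_zip p.toList q.toList h, pvMain]
  have hf : (p.toList.zip q.toList).foldl
      (fun (acc : List Char) ab =>
        if ab.1 = '-' then (if ab.2 ≠ '-' then acc ++ ['I'] else acc)
        else if ab.2 = '-' then acc ++ ['D']
        else acc ++ ['M']) [] = (p.toList.zip q.toList).foldl pvStepB [] := rfl
  rw [hf, List.map_fst_zip (le_of_eq h), List.map_snd_zip (le_of_eq h.symm)]
  simp
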